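-- pv_equiv track=rewrite | github.com/ycodingstudy/codingstudy | 9week - 이진탐색/03 백준 6236 - 용돈 관리.py | bi_search_recursion
-- ===== SOURCE A (Python) =====
-- def check(limit, use_plan, m):
--     # 목표 : limit만큼 돈을 m번 인출 성공하면 True
--     cur_money = 0 # 현재 꺼낸 돈
--     for today_use in use_plan:
--         if today_use > limit:
--             return False
--         if today_use <= cur_money:
--             cur_money -= today_use
--         else: # 꺼낸 돈이 쓸 돈 보다 부족하면
--             m -= 1
--             if m < 0:
--                 return False
--             cur_money = limit - today_use #  돈 집어 넣은 것(limit) - today_use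
--     return True
--
-- def bi_search_recursion(use_plan, start, end, m):
--     if start > end:
--         return start  # mid 값을 반환해야함
--     mid = (start + end) // 2
--     if check(mid, use_plan, m):
--         # 더 적은 금액 찾기
--         return bi_search_recursion(use_plan, start, mid - 1, m)
--     else:
--         return bi_search_recursion(use_plan, mid + 1, end, m)
-- ===== SOURCE B (Python) =====
-- def check(limit, use_plan, m):
--     # Option-state fold: st is None once the plan is infeasible, else (cur_money, withdrawals_left)
--     st = (0, m)
--     for x in use_plan:
--         if st is not None:
--             cur, k = st
--             if x > limit or (x > cur and k <= 0):
--                 st = None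
--             elif x <= cur:
--                 st = (cur - x, k)
--             else:
--                 st = (limit - x, k - 1)
--     return st is not None
--
-- def bi_search_recursion(use_plan, start, end, m):
--     while start <= end:
--         mid = (start + end) // 2
--         if check(mid, use_plan, m):
--             end = mid - 1
--         else:
--             start = mid + 1
--     return start
-- ===== Notes on version B (the rewrite author's own statement) =====
-- stated objective: alternative
-- what changed: The feasibility test becomes a fold over an Option state (None = failed) instead of a loop with three early returns, and the recursive binary search becomes an iterative while-loop returning start.
import Mathlib
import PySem

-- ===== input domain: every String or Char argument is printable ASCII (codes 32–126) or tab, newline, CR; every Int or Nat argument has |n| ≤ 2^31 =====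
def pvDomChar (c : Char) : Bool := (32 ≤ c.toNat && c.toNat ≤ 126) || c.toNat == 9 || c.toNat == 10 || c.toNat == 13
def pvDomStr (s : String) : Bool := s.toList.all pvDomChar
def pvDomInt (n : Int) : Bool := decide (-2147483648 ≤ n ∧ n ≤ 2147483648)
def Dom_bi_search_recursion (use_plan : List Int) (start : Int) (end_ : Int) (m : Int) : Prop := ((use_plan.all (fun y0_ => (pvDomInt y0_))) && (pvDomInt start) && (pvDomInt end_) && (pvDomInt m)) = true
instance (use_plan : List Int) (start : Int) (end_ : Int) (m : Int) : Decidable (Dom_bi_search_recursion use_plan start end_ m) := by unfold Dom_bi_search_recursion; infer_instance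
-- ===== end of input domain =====

-- B replaces the early-return check loop by an Option-state fold and the recursive binary search by an iterative while-loop; objective: alternative.


-- ===== PORT A =====
-- 'check': the greedy for-loop over use_plan with state (cur_money, m) and early returns
def checkGo (limit : Int) (cur_money : Int) (m : Int) : List Int → Bool
  | [] => true
  | today_use :: rest =>
    if today_use > limit then false
    else if today_use ≤ cur_money then checkGo limit (cur_money - today_use) m rest
    else if m - 1 < 0 then false
    else checkGo limit (limit - today_use) (m - 1) rest

def check (limit : Int) (use_plan : List Int) (m : Int) : Bool :=
  checkGo limit 0 m use_plan

def bi_search_recursion (use_plan : List Int) (start : Int) (end_ : Int) (m : Int) : Int :=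
  if h : start > end_ then start
  else
    let mid := PySem.Int.floordiv (start + end_) 2
    if check mid use_plan m then
      bi_search_recursion use_plan start (mid - 1) m
    else
      bi_search_recursion use_plan (mid + 1) end_ m
termination_by (end_ - start + 1).toNat
decreasing_by
  · have := PySem.Int.floordiv_two_mid_bounds (lo := start) (hi := end_) (by omega)
    omega
  · have := PySem.Int.floordiv_two_mid_bounds (lo := start) (hi := end_) (by omega)
    omega

-- ===== PORT B =====
-- one step of B's fold: none = plan already infeasible
def stepB (limit : Int) (st : Option (Int × Int)) (x : Int) : Option (Int × Int) :=
  match st with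
  | none => none
  | some (cur, k) =>
    if x > limit ∨ (x > cur ∧ k ≤ 0) then none
    else if x ≤ cur then some (cur - x, k)
    else some (limit - x, k - 1)

def checkB (limit : Int) (use_plan : List Int) (m : Int) : Bool :=
  (use_plan.foldl (stepB limit) (some (0, m))).isSome

-- the while-loop of B: shrink [start, end_] until start > end_, then return start
def bsLoop (use_plan : List Int) (m : Int) (start : Int) (end_ : Int) : Int :=
  if h : start ≤ end_ then
    let mid := PySem.Int.floordiv (start + end_) 2
    if checkB mid use_plan m then
      bsLoop use_plan m start (mid - 1)
    else
      bsLoop use_plan m (mid + 1) end_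
  else start
termination_by (end_ - start + 1).toNat
decreasing_by
  · have := PySem.Int.floordiv_two_mid_bounds (lo := start) (hi := end_) h
    omega
  · have := PySem.Int.floordiv_two_mid_bounds (lo := start) (hi := end_) h
    omega

def bi_search_recursion_alt (use_plan : List Int) (start : Int) (end_ : Int) (m : Int) : Int :=
  bsLoop use_plan m start end_

-- ===== PRECONDITION & SPEC =====
def Spec_bi_search_recursion (use_plan : List Int) (start : Int) (end_ : Int) (m : Int) (out : Int) : Prop := out = bi_search_recursion_alt use_plan start end_ m
instance (use_plan : List Int) (start : Int) (end_ : Int) (m : Int) (out : Int) : Decidable (Spec_bi_search_recursion use_plan start end_ m out) := by unfold Spec_bi_search_recursion; infer_instance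

-- ===== CLAIM (what is proved, stated in full; the proofs are below) =====
def Claim_equal_bi_search_recursion : Prop := ∀ (use_plan : List Int) (start : Int) (end_ : Int) (m : Int), Dom_bi_search_recursion use_plan start end_ m → Spec_bi_search_recursion use_plan start end_ m (bi_search_recursion use_plan start end_ m)

-- ===== LEMMAS AND PROOFS =====
theorem foldl_stepB_none (limit : Int) (l : List Int) :
    l.foldl (stepB limit) none = none := by
  induction l with
  | nil => rfl
  | cons x rest ih => simpa [List.foldl, stepB] using ih

theorem checkGo_eq_fold (limit : Int) (l : List Int) :
    ∀ (cur m : Int),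
      checkGo limit cur m l = (l.foldl (stepB limit) (some (cur, m))).isSome := by
  induction l with
  | nil => intro cur m; rfl
  | cons x rest ih =>
    intro cur m
    by_cases hlim : x > limit
    · simp [checkGo, hlim, List.foldl, stepB, foldl_stepB_none]
    · by_cases hcur : x ≤ cur
      · have h2 : ¬ (cur < x ∧ m ≤ 0) := by omega
        simp [checkGo, hlim, hcur, List.foldl, stepB, h2, ih]
      · by_cases hm : m - 1 < 0
        · have h2 : cur < x ∧ m ≤ 0 := by omega
          simp [checkGo, hlim, hcur, hm, List.foldl, stepB, h2, foldl_stepB_none]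
        · have h2 : ¬ (cur < x ∧ m ≤ 0) := by omega
          simp [checkGo, hlim, hcur, hm, List.foldl, stepB, h2, ih]

theorem check_eq_checkB (limit : Int) (use_plan : List Int) (m : Int) :
    check limit use_plan m = checkB limit use_plan m :=
  checkGo_eq_fold limit use_plan 0 m

theorem bi_search_eq_loop (use_plan : List Int) (m : Int) :
    ∀ (n : Nat) (start end_ : Int), (end_ - start + 1).toNat ≤ n →
      bi_search_recursion use_plan start end_ m = bsLoop use_plan m start end_ := by
  intro n
  induction n with
  | zero =>
    intro start end_ hn
    have h : start > end_ := by omega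
    rw [bi_search_recursion, bsLoop]
    simp [h, not_le.mpr h]
  | succ k ih =>
    intro start end_ hn
    by_cases h : start > end_
    · rw [bi_search_recursion, bsLoop]
      simp [h, not_le.mpr h]
    · have hle : start ≤ end_ := by omega
      have hmid := PySem.Int.floordiv_two_mid_bounds (lo := start) (hi := end_) hle
      rw [bi_search_recursion, bsLoop]
      simp only [h, hle, dif_pos, dite_false,
        check_eq_checkB (PySem.Int.floordiv (start + end_) 2) use_plan m]
      by_cases hc : checkB (PySem.Int.floordiv (start + end_) 2) use_plan m = true
      · simp only [hc, if_true]
        exact ih start (PySem.Int.floordiv (start + end_) 2 - 1) (by omega)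
      · simp only [hc, Bool.false_eq_true, if_false]
        exact ih (PySem.Int.floordiv (start + end_) 2 + 1) end_ (by omega)

-- ===== VERDICT (by name: the statement is the Claim_ definition above) =====
theorem bi_search_recursion_spec : Claim_equal_bi_search_recursion := by
  intro use_plan start end_ m _
  unfold Spec_bi_search_recursion bi_search_recursion_alt
  exact bi_search_eq_loop use_plan m (end_ - start + 1).toNat start end_ le_rfl
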